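-- pv_equiv track=rewrite | github.com/chedychaaben/WebClassifyPredict-FARM-Stack-App | backend/bs/contact.py | FindContactUrl
-- ===== SOURCE A (Python) =====
-- def FindContactUrl(liens,url):
--     sub = 'contact'
--     lienC = ""
--     for lien in liens:
--         if sub in lien:
--
--             if 'http' in lien:
--                 lienC = lien
--             else:
--                 lienC = url+lien
--
--     if lienC == '':
--         lienC = url
--     return(lienC)
-- ===== SOURCE B (Python) =====
-- def FindContactUrl(liens, url):
--     for lien in reversed(liens):
--         if 'contact' in lien:
--             return lien if 'http' in lien else url + lien
--     return url
-- ===== Notes on version B (the rewrite author's own statement) =====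
-- stated objective: alternative
-- what changed: Replaces the forward scan that overwrites a last-match accumulator (plus an empty-string sentinel default) with a short-circuiting reverse search that returns the first match from the end, or url when none exists.
import Mathlib
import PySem

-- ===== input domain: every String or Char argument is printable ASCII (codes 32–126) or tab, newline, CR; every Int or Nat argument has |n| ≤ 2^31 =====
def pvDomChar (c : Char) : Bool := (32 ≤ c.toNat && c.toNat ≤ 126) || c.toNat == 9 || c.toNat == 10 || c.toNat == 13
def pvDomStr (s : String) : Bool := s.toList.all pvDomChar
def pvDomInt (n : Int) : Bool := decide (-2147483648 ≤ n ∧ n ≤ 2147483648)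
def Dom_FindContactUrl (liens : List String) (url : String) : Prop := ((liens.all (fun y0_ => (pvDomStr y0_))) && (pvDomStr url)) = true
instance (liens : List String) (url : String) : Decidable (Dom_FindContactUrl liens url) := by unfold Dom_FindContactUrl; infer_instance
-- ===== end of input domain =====

-- B replaces A's forward keep-last accumulator scan by a short-circuiting reverse search (alternative decomposition, same cost).

-- ===== PORT A =====
def FindContactUrl (liens : List String) (url : String) : String :=
  let lienC :=
    liens.foldl (fun lienC lien =>
      if PySem.Str.isIn "contact" lien then
        if PySem.Str.isIn "http" lien then lien else url ++ lien
      else lienC) ""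
  if lienC = "" then url else lienC

-- ===== PORT B =====
-- the reverse loop: return on the first (from the end) lien containing 'contact'
def FindContactUrlAltGo (url : String) : List String → String
  | [] => url
  | lien :: rest =>
    if PySem.Str.isIn "contact" lien then
      if PySem.Str.isIn "http" lien then lien else url ++ lien
    else FindContactUrlAltGo url rest

def FindContactUrl_alt (liens : List String) (url : String) : String :=
  FindContactUrlAltGo url liens.reverse

-- ===== PRECONDITION & SPEC =====
def Spec_FindContactUrl (liens : List String) (url : String) (out : String) : Prop := out = FindContactUrl_alt liens url
instance (liens : List String) (url : String) (out : String) : Decidable (Spec_FindContactUrl liens url out) := by unfold Spec_FindContactUrl; infer_instance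

-- ===== CLAIM (what is proved, stated in full; the proofs are below) =====
def Claim_equal_FindContactUrl : Prop := ∀ (liens : List String) (url : String), Dom_FindContactUrl liens url → Spec_FindContactUrl liens url (FindContactUrl liens url)

-- ===== LEMMAS AND PROOFS =====

-- the per-element match value
def pvG (url lien : String) : Option String :=
  if PySem.Str.isIn "contact" lien then
    some (if PySem.Str.isIn "http" lien then lien else url ++ lien)
  else none

lemma pvFold_eq (url : String) (l : List String) (acc : String) :
    l.foldl (fun lienC lien =>
      if PySem.Str.isIn "contact" lien then
        if PySem.Str.isIn "http" lien then lien else url ++ lien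
      else lienC) acc = ((l.filterMap (pvG url)).getLast?).getD acc := by
  induction l generalizing acc with
  | nil => rfl
  | cons x t ih =>
    rw [List.foldl_cons, List.filterMap_cons]
    by_cases h : PySem.Str.isIn "contact" x = true
    · have hg : pvG url x = some (if PySem.Str.isIn "http" x then x else url ++ x) := by
        unfold pvG; rw [if_pos h]
      rw [if_pos h, hg, ih, List.getLast?_cons, Option.getD_some]
    · have hg : pvG url x = none := by unfold pvG; rw [if_neg h]
      rw [if_neg h, hg]
      exact ih acc

lemma pvAltGo_eq (url : String) (l : List String) :
    FindContactUrlAltGo url l = ((l.filterMap (pvG url)).head?).getD url := by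
  induction l with
  | nil => rfl
  | cons x t ih =>
    show (if PySem.Str.isIn "contact" x then
            if PySem.Str.isIn "http" x then x else url ++ x
          else FindContactUrlAltGo url t) = _
    rw [List.filterMap_cons]
    by_cases h : PySem.Str.isIn "contact" x = true
    · have hg : pvG url x = some (if PySem.Str.isIn "http" x then x else url ++ x) := by
        unfold pvG; rw [if_pos h]
      rw [if_pos h, hg, List.head?_cons, Option.getD_some]
    · have hg : pvG url x = none := by unfold pvG; rw [if_neg h]
      rw [if_neg h, hg]
      exact ih

lemma pvG_ne_empty (url lien v : String) (h : pvG url lien = some v) : v ≠ "" := by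
  unfold pvG at h
  by_cases hc : PySem.Str.isIn "contact" lien = true
  · rw [if_pos hc] at h
    have h' := Option.some.inj h
    have hinf := (PySem.Str.isIn_iff_infix "contact" lien).1 hc
    have hlien : lien ≠ "" := by
      intro he; rw [he] at hinf; simp at hinf
    by_cases hh : PySem.Str.isIn "http" lien = true
    · rw [if_pos hh] at h'; rw [← h']; exact hlien
    · rw [if_neg hh] at h'
      rw [← h']
      intro he
      rcases (by simpa using he : url = "" ∧ lien = "") with ⟨_, h2⟩
      exact hlien h2
  · rw [if_neg hc] at h
    exact absurd h (by simp)

-- ===== VERDICT (by name: the statement is the Claim_ definition above) =====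
theorem FindContactUrl_spec : Claim_equal_FindContactUrl := by
  intro liens url _
  unfold Spec_FindContactUrl FindContactUrl FindContactUrl_alt
  simp only [pvFold_eq, pvAltGo_eq, List.filterMap_reverse, List.head?_reverse]
  cases hl : (liens.filterMap (pvG url)).getLast? with
  | none => simp
  | some v =>
    have hv : v ∈ liens.filterMap (pvG url) := List.mem_of_getLast? hl
    rcases List.mem_filterMap.1 hv with ⟨lien, _, hg⟩
    have := pvG_ne_empty url lien v hg
    simp [this]
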